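-- pv_equiv track=rewrite | github.com/Happenmass/kaggle-csrio | train_hf_trainer_state_cv.py | _fit_hw
-- ===== SOURCE A (Python) =====
-- from typing import Dict, List, Tuple
-- import math
--
-- def _fit_hw(n_tokens: int) -> Tuple[int, int]:
--     h = int(math.sqrt(n_tokens))
--     w = h
--     while h * w < n_tokens:
--         w += 1
--         if h * w < n_tokens:
--             h += 1
--     return h, w
-- ===== SOURCE B (Python) =====
-- import math
--
-- def _fit_hw(n_tokens: int):
--     # closed form: w = ceil(sqrt(n)), h = ceil(n / w) (0 when w == 0)
--     w = math.isqrt(n_tokens)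
--     if w * w < n_tokens:
--         w += 1
--     h = -(-n_tokens // w) if w else 0
--     return h, w
-- ===== Notes on version B (the rewrite author's own statement) =====
-- stated objective: simpler
-- what changed: Replaced A's alternating-increment search loop with a direct closed form: w = ceil(sqrt(n)) via math.isqrt, h = ceil(n/w).
import Mathlib
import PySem

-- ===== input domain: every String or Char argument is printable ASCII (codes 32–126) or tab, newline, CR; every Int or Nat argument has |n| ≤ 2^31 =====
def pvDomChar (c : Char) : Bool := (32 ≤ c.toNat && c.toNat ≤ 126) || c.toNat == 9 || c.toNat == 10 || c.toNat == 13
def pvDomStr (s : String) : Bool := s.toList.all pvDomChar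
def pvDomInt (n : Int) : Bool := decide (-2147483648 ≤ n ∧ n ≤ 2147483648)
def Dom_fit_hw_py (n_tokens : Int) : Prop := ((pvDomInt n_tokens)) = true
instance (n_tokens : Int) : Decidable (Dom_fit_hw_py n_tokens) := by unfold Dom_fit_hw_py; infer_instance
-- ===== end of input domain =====

-- B replaces A's incremental while-loop with a closed form (w = ceil(sqrt n), h = ceil(n/w)); objective: simpler.
-- ===== PORT A =====
-- the while-loop of A, with a fuel bound that merely makes the recursion total (the loop body is unchanged)
def fitLoopA : Nat → Int → Int → Int → Int × Int
  | 0, _, h, w => (h, w)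
  | fuel+1, n, h, w =>
    if h * w < n then
      let w' := w + 1
      let h' := if h * w' < n then h + 1 else h
      fitLoopA fuel n h' w'
    else (h, w)

def fit_hw_py (n_tokens : Int) : Int × Int :=
  -- int(math.sqrt(n)) ported as the integer square root: exact for 0 ≤ n ≤ 2^31 (the domain),
  -- where the double sqrt is too accurate to cross an integer boundary
  let h : Int := ((n_tokens.toNat).sqrt : Nat)
  let w : Int := h
  fitLoopA (n_tokens.toNat + 2) n_tokens h w

-- ===== PORT B =====
def fit_hw_py_alt (n_tokens : Int) : Int × Int :=
  -- math.isqrt(n) → Nat.sqrt (raises on n < 0 in Python: excluded by Pre_)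
  let w0 : Int := ((n_tokens.toNat).sqrt : Nat)
  let w : Int := if w0 * w0 < n_tokens then w0 + 1 else w0
  let h : Int := if w ≠ 0 then -(PySem.Int.floordiv (-n_tokens) w) else 0
  (h, w)

-- ===== PRECONDITION & SPEC =====
-- Pre_: math.sqrt / math.isqrt raise ValueError on negative input in both A and B
def Pre_fit_hw_py (n_tokens : Int) : Prop := 0 ≤ n_tokens
instance (n_tokens : Int) : Decidable (Pre_fit_hw_py n_tokens) := by unfold Pre_fit_hw_py; infer_instance
def pvWitness_fit_hw_py : Int := 7

def Spec_fit_hw_py (n_tokens : Int) (out : Int × Int) : Prop := out = fit_hw_py_alt n_tokens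
instance (n_tokens : Int) (out : Int × Int) : Decidable (Spec_fit_hw_py n_tokens out) := by unfold Spec_fit_hw_py; infer_instance

-- ===== CLAIM (what is proved, stated in full; the proofs are below) =====
def Claim_equal_fit_hw_py : Prop := ∀ (n_tokens : Int), Dom_fit_hw_py n_tokens → Pre_fit_hw_py n_tokens → Spec_fit_hw_py n_tokens (fit_hw_py n_tokens)

-- ===== LEMMAS AND PROOFS =====

lemma ceil_div_eq (a w q : Int) (hw : 0 < w) (h1 : (q - 1) * w < a) (h2 : a ≤ q * w) :
    -(PySem.Int.floordiv (-a) w) = q :=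
  (PySem.Int.neg_floordiv_neg_eq_iff_of_pos hw).mpr ⟨h1, h2⟩

-- the core equality, with the shared integer square root abstracted
lemma fit_hw_key (n : Int) (hn : 0 ≤ n) :
    fitLoopA (n.toNat + 2) n ((n.toNat).sqrt : Nat) ((n.toNat).sqrt : Nat) =
      (let w0 : Int := ((n.toNat).sqrt : Nat)
       let w : Int := if w0 * w0 < n then w0 + 1 else w0
       let h : Int := if w ≠ 0 then -(PySem.Int.floordiv (-n) w) else 0
       (h, w)) := by
  set m := n.toNat with hm
  have hnm : (m : Int) = n := by omega
  set S : Int := ((m.sqrt : Nat) : Int) with hS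
  have hS0 : (0 : Int) ≤ S := by positivity
  have hlo : S * S ≤ n := by
    have h : ((m.sqrt * m.sqrt : Nat) : Int) ≤ (m : Int) := by exact_mod_cast Nat.sqrt_le m
    push_cast at h
    rw [hnm] at h
    exact h
  have hhi : n < (S + 1) * (S + 1) := by
    have h : (m : Int) < (((m.sqrt + 1) * (m.sqrt + 1) : Nat) : Int) := by
      exact_mod_cast Nat.lt_succ_sqrt m
    push_cast at h
    rw [hnm] at h
    exact h
  obtain ⟨k, hk⟩ : ∃ k, m + 2 = k + 1 + 1 := ⟨m, rfl⟩
  rw [hk]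
  by_cases hcase : S * S < n
  · -- the while-loop runs exactly once: w becomes S + 1
    by_cases hcase2 : S * (S + 1) < n
    · -- h is incremented too; both sides give (S + 1, S + 1)
      have hstop : ¬ ((S + 1) * (S + 1) < n) := by linarith
      have hc : -(PySem.Int.floordiv (-n) (S + 1)) = S + 1 :=
        ceil_div_eq n _ _ (by linarith) (by nlinarith) (by linarith)
      simp only [fitLoopA, hcase, if_pos, hcase2, hstop, if_false]
      have hw0 : S + 1 ≠ 0 := by omega
      simp [hcase, hw0, hc]
    · -- h stays S; both sides give (S, S + 1)
      have hc : -(PySem.Int.floordiv (-n) (S + 1)) = S :=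
        ceil_div_eq n _ _ (by linarith) (by nlinarith) (by nlinarith [not_lt.mp hcase2])
      simp only [fitLoopA, hcase, if_pos, hcase2, if_false]
      have hw0 : S + 1 ≠ 0 := by omega
      simp [hcase, hw0, hc]
  · -- the loop never runs: n = S * S, both sides give (S, S)
    have hle : n ≤ S * S := not_lt.mp hcase
    simp only [fitLoopA, hcase, reduceIte]
    by_cases hz : S = 0
    · have hzero : n = 0 := by nlinarith
      simp [hz, hzero]
    · have hSpos : 0 < S := lt_of_le_of_ne hS0 (Ne.symm hz)
      have hc : -(PySem.Int.floordiv (-n) S) = S :=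
        ceil_div_eq n _ _ hSpos (by nlinarith) hle
      simp [hcase, hz, hc]

-- ===== VERDICT (by name: the statement is the Claim_ definition above) =====
theorem fit_hw_py_spec : Claim_equal_fit_hw_py := by
  intro n _ hn
  unfold Spec_fit_hw_py fit_hw_py fit_hw_py_alt
  have key := fit_hw_key n hn
  simp only at key ⊢
  exact key
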